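-- pv_equiv track=rewrite | github.com/aidenhock/CECS427 | Assignment Graphs/graph.py | generate_node_labels
-- ===== SOURCE A (Python) =====
-- import string
-- from itertools import product
--
-- def generate_node_labels(n):
--     """
--     Generates node labels using letters. After 'z', it continues with 'aa', 'ab', etc.
--     """
--     labels = {}
--     for i in range(n):
--         # Calculate the number of letters needed
--         length = 1
--         while len(labels) < n:
--             for letters in product(string.ascii_lowercase, repeat=length):
--                 label = ''.join(letters)
--                 labels[len(labels)] = label
--                 if len(labels) == n:
--                     break
--             length += 1
--     return labels
-- ===== SOURCE B (Python) =====
-- import string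
--
-- def generate_node_labels(n):
--     """
--     Generates node labels using letters. After 'z', it continues with 'aa', 'ab', etc.
--     Each label is computed independently from its index by bijective base-26 conversion.
--     """
--     labels = {}
--     for i in range(n):
--         k = i
--         s = ""
--         while True:
--             s = string.ascii_lowercase[k % 26] + s
--             k = k // 26 - 1
--             if k < 0:
--                 break
--         labels[i] = s
--     return labels
-- ===== Notes on version B (the rewrite author's own statement) =====
-- stated objective: simpler
-- what changed: replaces the nested product-enumeration loops (itertools.product over growing lengths, filling the dict until it is full) by an independent per-index bijective base-26 conversion computing each label directly from its index
import Mathlib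
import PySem

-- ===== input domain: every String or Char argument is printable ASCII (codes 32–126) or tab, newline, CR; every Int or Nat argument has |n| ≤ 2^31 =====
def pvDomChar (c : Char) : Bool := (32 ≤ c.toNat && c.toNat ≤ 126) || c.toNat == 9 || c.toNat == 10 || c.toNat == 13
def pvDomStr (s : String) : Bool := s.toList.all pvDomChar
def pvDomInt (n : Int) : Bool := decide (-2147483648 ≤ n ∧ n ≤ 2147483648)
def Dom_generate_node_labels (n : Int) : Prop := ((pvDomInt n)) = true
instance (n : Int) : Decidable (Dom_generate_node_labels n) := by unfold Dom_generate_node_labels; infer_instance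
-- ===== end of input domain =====

-- B replaces A's nested product-enumeration loops by a per-index bijective base-26
-- conversion computing each label directly from its index (objective: simpler).

-- ===== PORT A =====
-- string.ascii_lowercase
def pvAlpha : List Char :=
  ['a','b','c','d','e','f','g','h','i','j','k','l','m','n','o','p','q','r','s','t','u','v','w','x','y','z']

-- itertools.product(string.ascii_lowercase, repeat=L), each tuple joined to a list of chars,
-- in product's order (first coordinate varies slowest)
def pvProd : Nat → List (List Char)
  | 0 => [[]]
  | L + 1 => pvAlpha.flatMap (fun c => (pvProd L).map (fun t => c :: t))

-- the inner 'for letters in product(...): labels[len(labels)] = label; if len(labels) == n: break'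
-- (the key len(labels) is always fresh, so the dict assignment appends)
def pvAddUpTo (n : Int) (labels : List (Int × String)) : List (List Char) → List (Int × String)
  | [] => labels
  | t :: rest =>
      let labels' := labels ++ [((labels.length : Int), String.mk t)]
      if (labels'.length : Int) = n then labels' else pvAddUpTo n labels' rest

-- the 'while len(labels) < n' loop; each iteration adds at least one label, so fuel n.toNat suffices
def pvWhile (n : Int) : Nat → List (Int × String) → Nat → List (Int × String)
  | 0, labels, _ => labels
  | fuel + 1, labels, length =>
      if (labels.length : Int) < n then
        pvWhile n fuel (pvAddUpTo n labels (pvProd length)) (length + 1)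
      else labels

def generate_node_labels (n : Int) : List (Int × String) :=
  (PySem.List.pyRange 0 n 1).foldl (fun labels _ => pvWhile n n.toNat labels 1) []

-- ===== PORT B =====
-- the 'while True' loop of B: prepend letter k % 26, continue with k // 26 - 1 while that is ≥ 0
-- (k stays ≥ 0, so Nat division coincides with Python's floor division here)
def pvLabel (k : Nat) : List Char :=
  if k < 26 then [pvAlpha.getD (k % 26) 'a']
  else pvLabel (k / 26 - 1) ++ [pvAlpha.getD (k % 26) 'a']
decreasing_by
  have : k / 26 ≤ k := Nat.div_le_self k 26
  omega

def generate_node_labels_alt (n : Int) : List (Int × String) :=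
  (PySem.List.pyRange 0 n 1).map (fun i => (i, String.mk (pvLabel i.toNat)))

-- ===== PRECONDITION & SPEC =====
def Spec_generate_node_labels (n : Int) (out : List (Int × String)) : Prop := out = generate_node_labels_alt n
instance (n : Int) (out : List (Int × String)) : Decidable (Spec_generate_node_labels n out) := by unfold Spec_generate_node_labels; infer_instance

-- ===== CLAIM (what is proved, stated in full; the proofs are below) =====
def Claim_equal_generate_node_labels : Prop := ∀ (n : Int), Dom_generate_node_labels n → Spec_generate_node_labels n (generate_node_labels n)

-- ===== LEMMAS AND PROOFS =====

-- labels of length L, in A's enumeration order, as base-26 digit strings (least significant digit last)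
def pvPad : Nat → Nat → List Char
  | 0, _ => []
  | L + 1, j => pvPad L (j / 26) ++ [pvAlpha.getD (j % 26) 'a']

-- number of labels of length ≤ L
def pvS : Nat → Nat
  | 0 => 0
  | L + 1 => 26 * (1 + pvS L)

-- the labels A appends, paired with their (fresh) integer keys starting at s
def pvAttach : Nat → List (List Char) → List (Int × String)
  | _, [] => []
  | s, t :: ts => ((s : Int), String.mk t) :: pvAttach (s + 1) ts

-- concatenation of the blocks pvProd L, pvProd (L+1), … (fuel many)
def pvBlocks : Nat → Nat → List (List Char)
  | _, 0 => []
  | L, f + 1 => pvProd L ++ pvBlocks (L + 1) f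

theorem pvS_succ (L : Nat) : pvS (L + 1) = pvS L + 26 ^ (L + 1) := by
  induction L with
  | zero => decide
  | succ L ih =>
    show 26 * (1 + pvS (L + 1)) = pvS (L + 1) + 26 ^ (L + 2)
    have h2 : pvS (L + 1) = 26 * (1 + pvS L) := rfl
    have h3 : (26 : Nat) ^ (L + 2) = 26 * 26 ^ (L + 1) := by ring
    omega

theorem pvAlpha_eq_range : pvAlpha = (List.range 26).map (fun r => pvAlpha.getD r 'a') := by decide

theorem range_mul_flatMap (m k : Nat) (f : Nat → List Char) :
    (List.range (m * k)).map f
      = (List.range m).flatMap (fun q => (List.range k).map (fun r => f (q * k + r))) := by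
  induction m with
  | zero => simp
  | succ m ih =>
    have : (m + 1) * k = m * k + k := by ring
    rw [this, List.range_add, List.map_append, ih, List.range_succ, List.flatMap_append]
    simp [List.map_map, Function.comp]

theorem pvProd_snoc (L : Nat) :
    pvProd (L + 1) = (pvProd L).flatMap (fun t => pvAlpha.map (fun c => t ++ [c])) := by
  induction L with
  | zero => decide
  | succ L ih =>
    have hdef : pvProd (L + 2) = pvAlpha.flatMap (fun c => (pvProd (L + 1)).map (fun t => c :: t)) := rfl
    rw [hdef]
    conv_lhs => rw [ih]
    conv_rhs => rw [show pvProd (L + 1) = pvAlpha.flatMap (fun c => (pvProd L).map (fun t => c :: t)) from rfl]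
    simp [List.map_flatMap, List.flatMap_map, List.map_map, Function.comp_def, List.flatMap_assoc]

theorem pvProd_eq_pad (L : Nat) :
    pvProd L = (List.range (26 ^ L)).map (pvPad L) := by
  induction L with
  | zero => decide
  | succ L ih =>
    rw [pvProd_snoc, ih, List.flatMap_map]
    have h26 : (26 : Nat) ^ (L + 1) = 26 ^ L * 26 := by ring
    rw [h26, range_mul_flatMap]
    apply List.flatMap_congr
    intro q hq
    rw [List.mem_range] at hq
    conv_lhs => rw [pvAlpha_eq_range]
    rw [List.map_map]
    apply List.map_congr_left
    intro r hr
    rw [List.mem_range] at hr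
    have hdef : pvPad (L + 1) (q * 26 + r) = pvPad L ((q * 26 + r) / 26) ++ [pvAlpha.getD ((q * 26 + r) % 26) 'a'] := rfl
    have hdiv : (q * 26 + r) / 26 = q := by omega
    have hmod : (q * 26 + r) % 26 = r := by omega
    simp [hdef, hdiv, hmod]

theorem pvLabel_eq_pad : ∀ (L j : Nat), j < 26 ^ (L + 1) → pvLabel (pvS L + j) = pvPad (L + 1) j := by
  intro L
  induction L with
  | zero =>
    intro j hj
    have hj26 : j < 26 := by simpa using hj
    have h0 : pvS 0 + j = j := by simp [pvS]
    rw [h0, pvLabel, if_pos hj26]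
    rfl
  | succ L ih =>
    intro j hj
    have h2 : pvS (L + 1) = 26 * (1 + pvS L) := rfl
    have h26 : (26 : Nat) ^ (L + 2) = 26 ^ (L + 1) * 26 := by ring
    have hge : ¬ (pvS (L + 1) + j < 26) := by omega
    rw [pvLabel, if_neg hge]
    have hdivsub : (pvS (L + 1) + j) / 26 - 1 = pvS L + j / 26 := by omega
    have hmod : (pvS (L + 1) + j) % 26 = j % 26 := by omega
    have hlt : j / 26 < 26 ^ (L + 1) := by omega
    rw [hdivsub, hmod, ih _ hlt]
    rfl

theorem pvBlocks_eq_map : ∀ (f L : Nat), pvBlocks (L + 1) f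
    = (List.range ((pvBlocks (L + 1) f).length)).map (fun j => pvLabel (pvS L + j)) := by
  intro f
  induction f with
  | zero => intro L; simp [pvBlocks]
  | succ f ih =>
    intro L
    have hdef : pvBlocks (L + 1) (f + 1) = pvProd (L + 1) ++ pvBlocks (L + 2) f := rfl
    have hlen : (pvProd (L + 1)).length = 26 ^ (L + 1) := by rw [pvProd_eq_pad]; simp
    rw [hdef, List.length_append, hlen, List.range_add, List.map_append]
    congr 1
    · rw [pvProd_eq_pad]
      apply List.map_congr_left
      intro j hj
      rw [List.mem_range] at hj
      exact (pvLabel_eq_pad L j hj).symm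
    · rw [List.map_map]
      conv_lhs => rw [ih (L + 1)]
      apply List.map_congr_left
      intro j hj
      have h : pvS L + (26 ^ (L + 1) + j) = pvS (L + 1) + j := by
        have := pvS_succ L; omega
      simp [h]

theorem pvBlocks_len_ge : ∀ (f L : Nat), f ≤ (pvBlocks (L + 1) f).length := by
  intro f
  induction f with
  | zero => intro L; simp
  | succ f ih =>
    intro L
    have hdef : pvBlocks (L + 1) (f + 1) = pvProd (L + 1) ++ pvBlocks (L + 2) f := rfl
    have hlen : (pvProd (L + 1)).length = 26 ^ (L + 1) := by rw [pvProd_eq_pad]; simp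
    have hp : 1 ≤ (26 : Nat) ^ (L + 1) := Nat.one_le_pow _ _ (by norm_num)
    have h3 : f ≤ (pvBlocks (L + 2) f).length := ih (L + 1)
    rw [hdef, List.length_append]
    omega

theorem pvAttach_append (xs ys : List (List Char)) : ∀ s,
    pvAttach s (xs ++ ys) = pvAttach s xs ++ pvAttach (s + xs.length) ys := by
  induction xs with
  | nil => intro s; simp [pvAttach]
  | cons x xs ih =>
    intro s
    simp only [List.cons_append, pvAttach, ih]
    have : s + 1 + xs.length = s + (x :: xs).length := by simp; omega
    rw [this]

theorem pvAttach_length : ∀ (xs : List (List Char)) (s : Nat), (pvAttach s xs).length = xs.length := by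
  intro xs
  induction xs with
  | nil => intro s; rfl
  | cons x xs ih => intro s; simp [pvAttach, ih]

theorem pvAttach_map_range (g : Nat → List Char) : ∀ (m s : Nat),
    pvAttach s ((List.range m).map g)
      = (List.range m).map (fun k => (((s + k : Nat) : Int), String.mk (g k))) := by
  intro m
  induction m with
  | zero => intro s; rfl
  | succ m ih =>
    intro s
    rw [List.range_succ, List.map_append, pvAttach_append, ih, List.map_append]
    simp [pvAttach]

theorem pvAddUpTo_eq (n : Int) : ∀ (items : List (List Char)) (labels : List (Int × String)),
    (labels.length : Int) < n →
    pvAddUpTo n labels items = labels ++ pvAttach labels.length (items.take (n.toNat - labels.length)) := by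
  intro items
  induction items with
  | nil => intro labels h; simp [pvAddUpTo, pvAttach]
  | cons t rest ih =>
    intro labels h
    rw [pvAddUpTo]
    by_cases hfull : ((labels ++ [((labels.length : Int), String.mk t)]).length : Int) = n
    · rw [if_pos hfull]
      have hlen' : (labels ++ [((labels.length : Int), String.mk t)]).length = labels.length + 1 := by simp
      have hfi : ((labels.length + 1 : Nat) : Int) = n := by rw [← hlen']; exact_mod_cast hfull
      push_cast at hfi
      have h1 : n.toNat - labels.length = 1 := by omega
      rw [h1]
      simp [pvAttach]
    · rw [if_neg hfull]
      have hlen' : (labels ++ [((labels.length : Int), String.mk t)]).length = labels.length + 1 := by simp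
      have hfi : ¬ ((labels.length + 1 : Nat) : Int) = n := by rw [← hlen']; exact_mod_cast hfull
      push_cast at hfi
      have h' : (((labels ++ [((labels.length : Int), String.mk t)]).length : Nat) : Int) < n := by
        rw [hlen']; push_cast; omega
      rw [ih _ h', hlen']
      have h3 : n.toNat - labels.length = (n.toNat - (labels.length + 1)) + 1 := by omega
      rw [h3, List.take_succ_cons]
      simp [pvAttach]

theorem pvWhile_eq (n : Int) : ∀ (fuel L : Nat) (labels : List (Int × String)),
    pvWhile n fuel labels (L + 1)
      = labels ++ pvAttach labels.length ((pvBlocks (L + 1) fuel).take (n.toNat - labels.length)) := by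
  intro fuel
  induction fuel with
  | zero => intro L labels; simp [pvWhile, pvBlocks, pvAttach]
  | succ fuel ih =>
    intro L labels
    rw [pvWhile]
    by_cases h : (labels.length : Int) < n
    · rw [if_pos h, pvAddUpTo_eq n (pvProd (L + 1)) labels h, ih (L + 1)]
      rw [show pvBlocks (L + 1 + 1) = pvBlocks (L + 2) from rfl]
      rw [show pvBlocks (L + 1) (fuel + 1) = pvProd (L + 1) ++ pvBlocks (L + 2) fuel from rfl]
      rw [List.take_append, pvAttach_append, List.append_assoc]
      congr 2
      have el : (labels ++ pvAttach labels.length (List.take (n.toNat - labels.length) (pvProd (L + 1)))).length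
          = labels.length + (List.take (n.toNat - labels.length) (pvProd (L + 1))).length := by
        rw [List.length_append, pvAttach_length]
      rw [el]
      congr 2
      rw [List.length_take]
      omega
    · rw [if_neg h]
      have h0 : n.toNat - labels.length = 0 := by omega
      simp [h0, pvAttach]

-- ===== VERDICT (by name: the statement is the Claim_ definition above) =====
theorem foldl_while_const (n : Int) (N : Nat) (R : List (Int × String))
    (hR : pvWhile n N R 1 = R) :
    ∀ (l : List Int), List.foldl (fun labels _ => pvWhile n N labels 1) R l = R := by
  intro l
  induction l with
  | nil => rfl
  | cons x xs ih => simpa [List.foldl, hR] using ih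

theorem generate_node_labels_spec : Claim_equal_generate_node_labels := by
  unfold Claim_equal_generate_node_labels
  intro n _
  unfold Spec_generate_node_labels generate_node_labels generate_node_labels_alt
  rw [PySem.List.pyRange_one]
  by_cases hn : n ≤ 0
  · have h0 : n.toNat = 0 := by omega
    simp [h0]
  · have hN1 : 1 ≤ n.toNat := by omega
    have h0 : (n - 0).toNat = n.toNat := by omega
    rw [h0]
    -- the first pass of the outer loop fills the whole dict
    have hstep1 : pvWhile n n.toNat [] 1 = pvAttach 0 ((pvBlocks 1 n.toNat).take n.toNat) := by
      have h := pvWhile_eq n n.toNat 0 []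
      simp only [Nat.zero_add] at h
      simpa using h
    have hBlen : n.toNat ≤ (pvBlocks 1 n.toNat).length := by
      have h := pvBlocks_len_ge n.toNat 0
      simpa only [Nat.zero_add] using h
    have hRlen : (pvAttach 0 ((pvBlocks 1 n.toNat).take n.toNat)).length = n.toNat := by
      rw [pvAttach_length, List.length_take]
      omega
    -- further passes leave the full dict unchanged
    have hstep3 : pvWhile n n.toNat (pvAttach 0 ((pvBlocks 1 n.toNat).take n.toNat)) 1
        = pvAttach 0 ((pvBlocks 1 n.toNat).take n.toNat) := by
      have h := pvWhile_eq n n.toNat 0 (pvAttach 0 ((pvBlocks 1 n.toNat).take n.toNat))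
      simp only [Nat.zero_add] at h
      rw [h, hRlen]
      have hz : n.toNat - n.toNat = 0 := by omega
      rw [hz]
      simp [pvAttach]
    -- evaluate A's fold: the first pass fills the dict, the rest are no-ops
    have hA : ∀ (l : List Int), l ≠ [] →
        List.foldl (fun labels _ => pvWhile n n.toNat labels 1) [] l
          = pvAttach 0 ((pvBlocks 1 n.toNat).take n.toNat) := by
      intro l hl
      cases l with
      | nil => exact absurd rfl hl
      | cons x xs =>
        rw [List.foldl_cons, hstep1]
        exact foldl_while_const n n.toNat _ hstep3 _
    rw [hA _ (by simp; omega)]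
    -- identify the filled dict with B's per-index labels
    have hB : pvBlocks 1 n.toNat
        = (List.range ((pvBlocks 1 n.toNat).length)).map (fun j => pvLabel j) := by
      have h := pvBlocks_eq_map n.toNat 0
      simpa only [Nat.zero_add, show pvS 0 = 0 from rfl] using h
    conv_lhs => rw [hB]
    rw [← List.map_take, List.take_range]
    have hmin : min n.toNat (pvBlocks 1 n.toNat).length = n.toNat := by omega
    rw [hmin, pvAttach_map_range, List.map_map]
    apply List.map_congr_left
    intro k hk
    simp
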